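-- pv_equiv track=rewrite | github.com/wonjuncio/gomoku-cli | computer.py | _get_max_continuous
-- ===== SOURCE A (Python) =====
-- from typing import List, Optional, Tuple
--
-- def _get_max_continuous(cells: List[str], color: str) -> int:
--     """윈도우 내에서 최대 연속 길이 계산"""
--     max_continuous = 0
--     current = 0
--
--     for cell in cells:
--         if cell == color:
--             current += 1
--             max_continuous = max(max_continuous, current)
--         else:
--             current = 0
--
--     return max_continuous
-- ===== SOURCE B (Python) =====
-- from itertools import groupby
-- from typing import List
--
--
-- def _get_max_continuous(cells: List[str], color: str) -> int:
--     """윈도우 내에서 최대 연속 길이 계산"""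
--     return max((len(list(g)) for k, g in groupby(cells) if k == color), default=0)
-- ===== Notes on version B (the rewrite author's own statement) =====
-- stated objective: idiomatic
-- what changed: Replaces the incremental current/max running-counter loop with itertools.groupby: partition cells into maximal runs, then take the max length of runs whose key equals color (default=0).
import Mathlib
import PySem

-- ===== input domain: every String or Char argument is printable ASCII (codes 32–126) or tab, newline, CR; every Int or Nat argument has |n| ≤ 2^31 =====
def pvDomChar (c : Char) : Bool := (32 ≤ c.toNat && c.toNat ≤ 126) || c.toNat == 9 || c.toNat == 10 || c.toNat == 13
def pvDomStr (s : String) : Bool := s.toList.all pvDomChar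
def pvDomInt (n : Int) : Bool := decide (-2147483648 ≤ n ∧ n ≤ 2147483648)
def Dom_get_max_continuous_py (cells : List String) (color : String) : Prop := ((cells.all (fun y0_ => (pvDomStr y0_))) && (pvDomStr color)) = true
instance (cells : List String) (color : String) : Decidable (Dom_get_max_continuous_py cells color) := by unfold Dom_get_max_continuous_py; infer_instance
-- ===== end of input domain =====

-- B replaces A's running current/max counter with a groupby-style runs-then-reduce formulation (idiomatic; same cost).

-- ===== PORT A =====
-- literal port of A's for-loop with state (max_continuous, current)
def get_max_continuous_py (cells : List String) (color : String) : Int :=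
  (cells.foldl
    (fun (st : Int × Int) cell =>
      if cell == color then (max st.1 (st.2 + 1), st.2 + 1) else (st.1, 0))
    (0, 0)).1

-- ===== PORT B =====
-- itertools.groupby: maximal runs of equal consecutive cells, as (key, length) pairs
def pvGroupRuns : List String → List (String × Nat)
  | [] => []
  | c :: rest =>
    match pvGroupRuns rest with
    | [] => [(c, 1)]
    | (k, n) :: gs => if c == k then (k, n + 1) :: gs else (c, 1) :: (k, n) :: gs

-- max(<lengths of runs with key == color>, default=0)
def get_max_continuous_py_alt (cells : List String) (color : String) : Int :=
  let lens : List Int := ((pvGroupRuns cells).filter (fun p => p.1 == color)).map (fun p => (p.2 : Int))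
  (PySem.List.max? lens (fun x => x)).getD 0

-- ===== PRECONDITION & SPEC =====
def Spec_get_max_continuous_py (cells : List String) (color : String) (out : Int) : Prop := out = get_max_continuous_py_alt cells color
instance (cells : List String) (color : String) (out : Int) : Decidable (Spec_get_max_continuous_py cells color out) := by unfold Spec_get_max_continuous_py; infer_instance

-- ===== CLAIM (what is proved, stated in full; the proofs are below) =====
def Claim_equal_get_max_continuous_py : Prop := ∀ (cells : List String) (color : String), Dom_get_max_continuous_py cells color → Spec_get_max_continuous_py cells color (get_max_continuous_py cells color)

-- ===== LEMMAS AND PROOFS =====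

-- A's loop, characterised from the front: best run given credit c already accumulated at the head
def pvBest (color : String) : List String → Int → Int
  | [], _ => 0
  | x :: rest, c => if x == color then max (c + 1) (pvBest color rest (c + 1)) else pvBest color rest 0

-- max matching run length over a run list
def pvRunMax (color : String) : List (String × Nat) → Int
  | [] => 0
  | (k, n) :: gs => if k == color then max (n : Int) (pvRunMax color gs) else pvRunMax color gs

-- credit contribution of the head run
def pvCredit (color : String) (gs : List (String × Nat)) (c : Int) : Int :=
  match gs with
  | [] => 0
  | (k, n) :: _ => if k == color then c + n else 0

lemma pvRunMax_nonneg (color : String) (gs : List (String × Nat)) : 0 ≤ pvRunMax color gs := by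
  induction gs with
  | nil => simp [pvRunMax]
  | cons p gs ih =>
    obtain ⟨k, n⟩ := p
    simp only [pvRunMax]
    split <;> omega

lemma pvFoldA (color : String) : ∀ (cells : List String) (m c : Int), 0 ≤ m →
    (List.foldl
      (fun (st : Int × Int) cell =>
        if cell == color then (max st.1 (st.2 + 1), st.2 + 1) else (st.1, 0))
      (m, c) cells).1 = max m (pvBest color cells c) := by
  intro cells
  induction cells with
  | nil => intro m c hm; simp [pvBest]; omega
  | cons x rest ih =>
    intro m c hm
    by_cases h : x == color
    · simp only [List.foldl, h, if_pos, pvBest]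
      rw [ih (max m (c + 1)) (c + 1) (by omega)]
      simp
    · simp only [List.foldl, pvBest, h, if_neg, Bool.false_eq_true, not_false_iff]
      rw [ih m 0 hm]

lemma pvBest_runs (color : String) : ∀ (cells : List String) (c : Int), 0 ≤ c →
    pvBest color cells c = max (pvRunMax color (pvGroupRuns cells)) (pvCredit color (pvGroupRuns cells) c) := by
  intro cells
  induction cells with
  | nil => intro c hc; simp [pvBest, pvGroupRuns, pvRunMax, pvCredit]
  | cons x rest ih =>
    intro c hc
    match hG : pvGroupRuns rest with
    | [] =>
      by_cases h : x == color
      · have hr := ih (c + 1) (by omega)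
        rw [hG] at hr
        simp only [pvRunMax, pvCredit] at hr
        simp only [pvBest, h, if_pos, hr, pvGroupRuns, hG, pvRunMax, pvCredit]
        push_cast
        omega
      · have hr := ih 0 (by omega)
        rw [hG] at hr
        simp only [pvRunMax, pvCredit] at hr
        simp only [pvBest, h, Bool.false_eq_true, if_neg, not_false_iff, hr,
          pvGroupRuns, hG, pvRunMax, pvCredit]
    | (k, n) :: gs =>
      have hGx : pvGroupRuns (x :: rest)
          = if x == k then (k, n + 1) :: gs else (x, 1) :: (k, n) :: gs := by
        simp [pvGroupRuns, hG]
      by_cases hxk : x == k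
      · rw [if_pos hxk] at hGx
        have hxk' : x = k := by simpa using hxk
        by_cases h : x == color
        · have hkc : (k == color) = true := by rw [← hxk']; exact h
          have hr := ih (c + 1) (by omega)
          rw [hG] at hr
          simp only [pvRunMax, pvCredit, hkc, if_pos] at hr
          simp only [pvBest, h, if_pos, hr, hGx, pvRunMax, pvCredit, hkc]
          push_cast
          omega
        · have hkc : (k == color) = false := by
            rw [← hxk']; simpa using h
          have hr := ih 0 (by omega)
          rw [hG] at hr
          simp only [pvRunMax, pvCredit, hkc, Bool.false_eq_true, if_neg, not_false_iff] at hr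
          simp only [pvBest, h, Bool.false_eq_true, if_neg, not_false_iff, hr,
            hGx, pvRunMax, pvCredit, hkc]
      · rw [if_neg (by simpa using hxk)] at hGx
        by_cases h : x == color
        · have hkc : (k == color) = false := by
            have hx : x = color := by simpa using h
            have hxk2 : ¬ x = k := by simpa using hxk
            simp only [beq_eq_false_iff_ne, ne_eq]
            intro hk; exact hxk2 (hx.trans hk.symm)
          have hr := ih (c + 1) (by omega)
          rw [hG] at hr
          simp only [pvRunMax, pvCredit, hkc, Bool.false_eq_true, if_neg, not_false_iff] at hr
          simp only [pvBest, h, if_pos, hr, hGx, pvRunMax, pvCredit, hkc,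
            Bool.false_eq_true]
          simp
          have := pvRunMax_nonneg color gs
          omega
        · have hr := ih 0 (by omega)
          rw [hG] at hr
          simp only [pvBest, h, Bool.false_eq_true, if_neg, not_false_iff, hr,
            hGx, pvRunMax, pvCredit]
          simp
          split <;> omega

lemma pvFoldlMax_shift : ∀ (l : List Int) (a b : Int), l.foldl max (max a b) = max a (l.foldl max b) := by
  intro l
  induction l with
  | nil => intro a b; rfl
  | cons x t ih =>
    intro a b
    simp only [List.foldl]
    rw [show max (max a b) x = max a (max b x) by omega, ih]

lemma pvMaxD_eq_foldl (l : List Int) (h : ∀ x ∈ l, 0 ≤ x) :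
    (PySem.List.max? l (fun x => x)).getD 0 = l.foldl max 0 := by
  cases l with
  | nil => simp [PySem.List.max?]
  | cons x t =>
    rw [PySem.List.max?_id_cons, Option.getD_some, List.foldl]
    have hx : 0 ≤ x := h x (List.mem_cons_self ..)
    rw [show max 0 x = x by omega]

lemma pvFoldFilter (color : String) : ∀ gs : List (String × Nat),
    ((gs.filter (fun p => p.1 == color)).map (fun p => ((p.2 : Nat) : Int))).foldl max 0
      = pvRunMax color gs := by
  intro gs
  induction gs with
  | nil => simp [pvRunMax]
  | cons p gs ih =>
    obtain ⟨k, n⟩ := p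
    by_cases hk : k == color
    · simp only [List.filter, hk, List.map, List.foldl, pvRunMax, if_pos]
      rw [show max 0 ((n : Nat) : Int) = max ((n : Nat) : Int) 0 by omega, pvFoldlMax_shift, ih]
    · simp only [List.filter, hk, pvRunMax, Bool.false_eq_true, if_neg, not_false_iff]
      exact ih

lemma pvAlt_eq_runMax (color : String) (cells : List String) :
    get_max_continuous_py_alt cells color = pvRunMax color (pvGroupRuns cells) := by
  unfold get_max_continuous_py_alt
  rw [pvMaxD_eq_foldl _ (by
    intro x hx
    obtain ⟨q, _, hq⟩ := List.mem_map.mp hx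
    omega)]
  exact pvFoldFilter color (pvGroupRuns cells)

-- ===== VERDICT (by name: the statement is the Claim_ definition above) =====
theorem get_max_continuous_py_spec : Claim_equal_get_max_continuous_py := by
  intro cells color _
  unfold Spec_get_max_continuous_py
  rw [pvAlt_eq_runMax]
  unfold get_max_continuous_py
  rw [pvFoldA color cells 0 0 le_rfl, pvBest_runs color cells 0 le_rfl]
  match hG : pvGroupRuns cells with
  | [] => simp [pvRunMax, pvCredit]
  | (k, n) :: gs =>
    simp only [pvRunMax, pvCredit]
    have := pvRunMax_nonneg color gs
    split <;> omega
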